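-- pv_equiv track=rewrite | github.com/Layr-Labs/github-flashlight | agent/cli.py | map_files_to_components
-- ===== SOURCE A (Python) =====
-- def map_files_to_components(
--     changed_files: list[str],
--     components: list[dict],
-- ) -> tuple[set[str], list[str]]:
--     """Map changed file paths to their owning components.
--
--     Returns:
--         (affected_component_names, unmapped_files)
--     """
--     affected: set[str] = set()
--     unmapped: list[str] = []
--
--     for filepath in changed_files:
--         matched = False
--         for comp in components:
--             root = comp.get("root_path", "")
--             if not root:
--                 continue
--             # Prefix match: file is under this component's root
--             if filepath == root or filepath.startswith(root.rstrip("/") + "/"):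
--                 affected.add(comp["name"])
--                 matched = True
--                 break
--         if not matched:
--             unmapped.append(filepath)
--
--     return affected, unmapped
-- ===== SOURCE B (Python) =====
-- def map_files_to_components(
--     changed_files: list[str],
--     components: list[dict],
-- ) -> tuple[set[str], list[str]]:
--     """Index component roots once, then walk each file's slash-prefixes.
--
--     exact maps a raw root to the earliest component carrying it; pref maps a
--     rstripped root to the earliest component carrying it.  A file's owning
--     component is the minimum-index candidate found by one walk over the file.
--     """
--     exact = {}
--     pref = {}
--     for idx, comp in enumerate(components):
--         root = comp.get("root_path", "")
--         if not root:
--             continue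
--         if root not in exact:
--             exact[root] = (idx, comp)
--         key = root.rstrip("/")
--         if key not in pref:
--             pref[key] = (idx, comp)
--
--     affected = set()
--     unmapped = []
--     for f in changed_files:
--         best = exact.get(f)
--         acc = ""
--         for ch in f:
--             if ch == "/":
--                 cand = pref.get(acc)
--                 if cand is not None and (best is None or cand[0] < best[0]):
--                     best = cand
--             acc += ch
--         if best is None:
--             unmapped.append(f)
--         else:
--             affected.add(best[1]["name"])
--     return affected, unmapped
-- ===== Notes on version B (the rewrite author's own statement) =====
-- stated objective: faster
-- what changed: A rescans every component (recomputing root.rstrip('/') each time) for every changed file; B indexes the component roots once into two dictionaries (raw root, rstripped root) keyed to the earliest component index, then resolves each file with one walk over its slash-prefixes keeping the minimum-index candidate.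
import Mathlib
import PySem

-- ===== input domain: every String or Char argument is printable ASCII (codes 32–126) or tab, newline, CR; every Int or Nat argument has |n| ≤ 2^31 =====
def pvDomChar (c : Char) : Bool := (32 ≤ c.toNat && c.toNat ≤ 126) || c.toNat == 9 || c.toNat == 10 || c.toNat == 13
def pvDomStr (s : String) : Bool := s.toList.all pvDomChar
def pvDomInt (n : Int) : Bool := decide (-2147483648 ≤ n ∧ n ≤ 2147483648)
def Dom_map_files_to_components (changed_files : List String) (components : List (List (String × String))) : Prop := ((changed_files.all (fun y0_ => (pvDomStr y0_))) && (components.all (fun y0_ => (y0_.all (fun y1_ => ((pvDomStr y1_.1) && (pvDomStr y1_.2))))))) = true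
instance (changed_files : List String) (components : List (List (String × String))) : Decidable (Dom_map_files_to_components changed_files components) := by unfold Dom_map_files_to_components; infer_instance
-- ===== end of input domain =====

-- B replaces A's per-file scan of all components by two dictionaries indexed once over the
-- roots (raw root, and rstripped root), then one walk over each file's slash-prefixes that
-- keeps the minimum-index candidate.  Return-value equivalence only; neither mutates arguments.

-- ===== PORT A =====
-- root.rstrip("/"): drop trailing '/' characters (exact: the strip set is the single char '/')
def pvRstripSlash (cs : List Char) : List Char := (cs.reverse.dropWhile (fun c => c == '/')).reverse

-- the inner 'for comp in components: … break' loop: first component matching filepath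
def pvFirstMatchA (filepath : String) : List (List (String × String)) → Option (List (String × String))
  | [] => none
  | comp :: rest =>
    let root := (PySem.Dict.mk comp).getD "root_path" ""
    if root = "" then pvFirstMatchA filepath rest
    else if filepath = root ∨ PySem.Chars.startswith filepath.toList (pvRstripSlash root.toList ++ ['/']) then
      some comp
    else pvFirstMatchA filepath rest

-- comp["name"] is ported as getD "name" "": Pre_ guarantees the key is present on every
-- component with a nonempty root_path, hence on every matched component.
def map_files_to_components (changed_files : List String) (components : List (List (String × String))) : List String × List String :=
  changed_files.foldl (fun (acc : PySem.Set String × List String) filepath =>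
    match pvFirstMatchA filepath components with
    | some comp => (PySem.Set.add acc.1 ((PySem.Dict.mk comp).getD "name" ""), acc.2)
    | none => (acc.1, acc.2 ++ [filepath])) (PySem.Set.empty, [])

-- ===== PORT B =====
-- one enumerate pass over components: exact[root] and pref[root.rstrip("/")] keep the
-- earliest (index, comp) for their key
def pvStepB (ds : PySem.Dict String (Int × List (String × String)) × PySem.Dict (List Char) (Int × List (String × String)))
    (p : Int × List (String × String)) :
    PySem.Dict String (Int × List (String × String)) × PySem.Dict (List Char) (Int × List (String × String)) :=
  let root := (PySem.Dict.mk p.2).getD "root_path" ""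
  if root = "" then ds
  else
    let e := if ds.1.contains root then ds.1 else ds.1.insert root p
    let pr := if ds.2.contains (pvRstripSlash root.toList) then ds.2 else ds.2.insert (pvRstripSlash root.toList) p
    (e, pr)

-- 'if cand is not None and (best is None or cand[0] < best[0]): best = cand'
def pvCombineB (best cand : Option (Int × List (String × String))) : Option (Int × List (String × String)) :=
  match cand with
  | none => best
  | some c =>
    match best with
    | none => some c
    | some b => if c.1 < b.1 then some c else some b

-- 'for ch in f: if ch == "/": …; acc += ch'
def pvWalkB (pref : PySem.Dict (List Char) (Int × List (String × String)))
    (acc : List Char) (best : Option (Int × List (String × String))) :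
    List Char → Option (Int × List (String × String))
  | [] => best
  | ch :: cs =>
    let best' := if ch == '/' then pvCombineB best (pref.get? acc) else best
    pvWalkB pref (acc ++ [ch]) best' cs

def pvBestB (f : String) (ex : PySem.Dict String (Int × List (String × String)))
    (pref : PySem.Dict (List Char) (Int × List (String × String))) :
    Option (Int × List (String × String)) :=
  pvWalkB pref [] (ex.get? f) f.toList

-- the second loop of B, over the files, against the two dictionaries built once
def pvLoopB (changed_files : List String)
    (ds : PySem.Dict String (Int × List (String × String)) × PySem.Dict (List Char) (Int × List (String × String))) :
    List String × List String :=
  changed_files.foldl (fun (acc : PySem.Set String × List String) f =>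
    match pvBestB f ds.1 ds.2 with
    | some p => (PySem.Set.add acc.1 ((PySem.Dict.mk p.2).getD "name" ""), acc.2)
    | none => (acc.1, acc.2 ++ [f])) (PySem.Set.empty, [])

def map_files_to_components_alt (changed_files : List String) (components : List (List (String × String))) : List String × List String :=
  pvLoopB changed_files ((PySem.List.enumerate components 0).foldl pvStepB (PySem.Dict.empty, PySem.Dict.empty))

-- ===== PRECONDITION & SPEC =====
-- the matching condition of A's inner loop, as a Bool predicate on one component
def pvMatch (f : String) (comp : List (String × String)) : Bool :=
  let root := (PySem.Dict.mk comp).getD "root_path" ""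
  if root = "" then false
  else decide (f = root ∨ PySem.Chars.startswith f.toList (pvRstripSlash root.toList ++ ['/']))

-- Pre_ excludes exactly the inputs on which the Python raises KeyError at comp["name"]:
-- those where, for some changed file, the first component matching it lacks a "name" key
-- (A raises at that first match, B at the same selected component).
def Pre_map_files_to_components (changed_files : List String) (components : List (List (String × String))) : Prop :=
  ∀ f ∈ changed_files, ∀ i, (h : i < components.length) → pvMatch f components[i] = true →
    (∀ c ∈ components.take i, pvMatch f c = false) → (PySem.Dict.mk components[i]).contains "name" = true
instance (changed_files : List String) (components : List (List (String × String))) : Decidable (Pre_map_files_to_components changed_files components) := by unfold Pre_map_files_to_components; infer_instance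

def pvWitness_map_files_to_components : List String × (List (List (String × String))) :=
  (["core/a.py", "docs/x.md"], [[("root_path", "core"), ("name", "core-comp")]])

def Spec_map_files_to_components (changed_files : List String) (components : List (List (String × String))) (out : List String × List String) : Prop := out = map_files_to_components_alt changed_files components
instance (changed_files : List String) (components : List (List (String × String))) (out : List String × List String) : Decidable (Spec_map_files_to_components changed_files components out) := by unfold Spec_map_files_to_components; infer_instance

-- ===== CLAIM (what is proved, stated in full; the proofs are below) =====
def Claim_equal_map_files_to_components : Prop := ∀ (changed_files : List String) (components : List (List (String × String))), Dom_map_files_to_components changed_files components → Pre_map_files_to_components changed_files components → Spec_map_files_to_components changed_files components (map_files_to_components changed_files components)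

-- ===== LEMMAS AND PROOFS =====

theorem pvFirstMatchA_eq_find? (f : String) (comps : List (List (String × String))) :
    pvFirstMatchA f comps = comps.find? (pvMatch f) := by
  induction comps with
  | nil => rfl
  | cons comp rest ih =>
    simp only [pvFirstMatchA, pvMatch, List.find?]
    by_cases h1 : (PySem.Dict.mk comp).getD "root_path" "" = ""
    · simp [pvMatch, h1, ih]
    · by_cases h2 : f = (PySem.Dict.mk comp).getD "root_path" "" ∨
        PySem.Chars.startswith f.toList (pvRstripSlash ((PySem.Dict.mk comp).getD "root_path" "").toList ++ ['/']) <;>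
        simp [pvMatch, h1, h2, ih]

-- the slash-prefixes of cs, each prefixed by acc (the walk's accumulator)
def pvSlashPrefixes (acc : List Char) : List Char → List (List Char)
  | [] => []
  | c :: cs => (if c == '/' then [acc] else []) ++ pvSlashPrefixes (acc ++ [c]) cs

theorem pvWalkB_eq_foldl (pref : PySem.Dict (List Char) (Int × List (String × String)))
    (cs : List Char) : ∀ acc best,
    pvWalkB pref acc best cs = ((pvSlashPrefixes acc cs).map (pref.get? ·)).foldl pvCombineB best := by
  induction cs with
  | nil => intro acc best; rfl
  | cons c cs ih =>
    intro acc best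
    simp only [pvWalkB, pvSlashPrefixes]
    by_cases hc : c == '/' <;> simp [hc, ih]

theorem mem_pvSlashPrefixes (q : List Char) (cs : List Char) : ∀ acc,
    q ∈ pvSlashPrefixes acc cs ↔ ∃ u v, cs = u ++ '/' :: v ∧ q = acc ++ u := by
  induction cs with
  | nil => intro acc; simp [pvSlashPrefixes]
  | cons c cs ih =>
    intro acc
    simp only [pvSlashPrefixes, List.mem_append]
    constructor
    · rintro (hq | hq)
      · by_cases hc : c == '/'
        · simp [hc] at hq
          exact ⟨[], cs, by simp [(beq_iff_eq).1 hc, hq]⟩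
        · simp [hc] at hq
      · rcases (ih (acc ++ [c])).1 hq with ⟨u, v, hcs, hq'⟩
        exact ⟨c :: u, v, by simp [hcs], by simp [hq']⟩
    · rintro ⟨u, v, hcs, hq⟩
      cases u with
      | nil =>
        simp at hcs
        left; simp [hcs.1, hq]
      | cons c' u =>
        simp at hcs
        right
        exact (ih (acc ++ [c])).2 ⟨u, v, hcs.2, by simp [hq, hcs.1]⟩

-- the two key predicates B's dictionaries index components by
def pvCondE (k : String) (p : Int × List (String × String)) : Bool :=
  let root := (PySem.Dict.mk p.2).getD "root_path" ""
  !(root == "") && (root == k)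

def pvCondP (k : List Char) (p : Int × List (String × String)) : Bool :=
  let root := (PySem.Dict.mk p.2).getD "root_path" ""
  !(root == "") && (pvRstripSlash root.toList == k)

theorem pvBuild_fst (l : List (Int × List (String × String))) :
    ∀ e0 p0 k, ((l.foldl pvStepB (e0, p0)).1).get? k = (e0.get? k).or (l.find? (pvCondE k)) := by
  induction l with
  | nil => intro e0 p0 k; simp
  | cons p l ih =>
    intro e0 p0 k
    simp only [List.foldl_cons, pvStepB]
    by_cases hr : (PySem.Dict.mk p.2).getD "root_path" "" = ""
    · rw [if_pos hr, ih]
      have hc : pvCondE k p = false := by simp [pvCondE, hr]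
      simp [List.find?, hc]
    · rw [if_neg hr, ih]
      by_cases hk : (PySem.Dict.mk p.2).getD "root_path" "" = k
      · have hc : pvCondE k p = true := by simp [pvCondE, hk, hk ▸ hr]
        simp only [List.find?, hc, cond_true]
        by_cases he : e0.contains ((PySem.Dict.mk p.2).getD "root_path" "") = true
        · rw [if_pos he]
          have hs : (e0.get? k).isSome := by
            rw [← hk, ← PySem.Dict.contains_eq_isSome_get?]; exact he
          obtain ⟨v, hv⟩ := Option.isSome_iff_exists.1 hs
          simp [hv]
        · rw [if_neg he]
          have hnone : e0.get? k = none := by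
            rw [← hk]
            have := PySem.Dict.contains_eq_isSome_get? e0 ((PySem.Dict.mk p.2).getD "root_path" "")
            rw [Bool.not_eq_true] at he
            rw [he] at this
            exact Option.not_isSome_iff_eq_none.1 (by simp [← this])
          rw [hk, PySem.Dict.get?_insert_self]
          simp [hnone]
      · have hc : pvCondE k p = false := by simp [pvCondE, hk]
        simp only [List.find?, hc, cond_false]
        by_cases he : e0.contains ((PySem.Dict.mk p.2).getD "root_path" "") = true
        · rw [if_pos he]
        · rw [if_neg he, PySem.Dict.get?_insert_of_ne _ _ (fun h => hk h.symm)]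

theorem pvBuild_snd (l : List (Int × List (String × String))) :
    ∀ e0 p0 k, ((l.foldl pvStepB (e0, p0)).2).get? k = (p0.get? k).or (l.find? (pvCondP k)) := by
  induction l with
  | nil => intro e0 p0 k; simp
  | cons p l ih =>
    intro e0 p0 k
    simp only [List.foldl_cons, pvStepB]
    by_cases hr : (PySem.Dict.mk p.2).getD "root_path" "" = ""
    · rw [if_pos hr, ih]
      have hc : pvCondP k p = false := by simp [pvCondP, hr]
      simp [List.find?, hc]
    · rw [if_neg hr, ih]
      by_cases hk : pvRstripSlash ((PySem.Dict.mk p.2).getD "root_path" "").toList = k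
      · have hc : pvCondP k p = true := by simp [pvCondP, hr, hk]
        simp only [List.find?, hc, cond_true]
        by_cases he : p0.contains (pvRstripSlash ((PySem.Dict.mk p.2).getD "root_path" "").toList) = true
        · rw [if_pos he]
          have hs : (p0.get? k).isSome := by
            rw [← hk, ← PySem.Dict.contains_eq_isSome_get?]; exact he
          obtain ⟨v, hv⟩ := Option.isSome_iff_exists.1 hs
          simp [hv]
        · rw [if_neg he]
          have hnone : p0.get? k = none := by
            rw [← hk]
            have := PySem.Dict.contains_eq_isSome_get? p0 (pvRstripSlash ((PySem.Dict.mk p.2).getD "root_path" "").toList)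
            rw [Bool.not_eq_true] at he
            rw [he] at this
            exact Option.not_isSome_iff_eq_none.1 (by simp [← this])
          rw [hk, PySem.Dict.get?_insert_self]
          simp [hnone]
      · have hc : pvCondP k p = false := by simp [pvCondP, hk]
        simp only [List.find?, hc, cond_false]
        by_cases he : p0.contains (pvRstripSlash ((PySem.Dict.mk p.2).getD "root_path" "").toList) = true
        · rw [if_pos he]
        · rw [if_neg he, PySem.Dict.get?_insert_of_ne _ _ (fun h => hk h.symm)]

theorem pvCombineB_find? (l : List (Int × List (String × String)))
    (hl : l.Pairwise (fun p q => p.1 < q.1)) (c0 c1 : Int × List (String × String) → Bool) :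
    pvCombineB (l.find? c0) (l.find? c1) = l.find? (fun p => c0 p || c1 p) := by
  induction l with
  | nil => rfl
  | cons x l ih =>
    rcases List.pairwise_cons.1 hl with ⟨hx, hl'⟩
    by_cases h0 : c0 x <;> by_cases h1 : c1 x
    · simp [List.find?, h0, h1, pvCombineB]
    · simp only [List.find?, h0, h1, cond_true, cond_false, Bool.or_self, h0]
      simp only [pvCombineB]
      cases hfind : l.find? c1 with
      | none => simp [h0]
      | some y =>
        have : x.1 < y.1 := hx y (List.mem_of_find?_eq_some hfind)
        simp [h0, not_lt.2 (le_of_lt this), Int.not_lt.2 (le_of_lt this)]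
    · simp only [List.find?, h0, h1, cond_true, cond_false, Bool.false_or]
      simp only [pvCombineB]
      cases hfind : l.find? c0 with
      | none => simp [h1]
      | some y =>
        have : x.1 < y.1 := hx y (List.mem_of_find?_eq_some hfind)
        simp [h1, this]
    · simpa [List.find?, h0, h1] using ih hl'

theorem pvFoldCombine_find? (l : List (Int × List (String × String)))
    (hl : l.Pairwise (fun p q => p.1 < q.1)) (cs : List (Int × List (String × String) → Bool)) :
    ∀ c0, (cs.map (l.find? ·)).foldl pvCombineB (l.find? c0)
      = l.find? (fun p => c0 p || cs.any (fun c => c p)) := by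
  induction cs with
  | nil => intro c0; simp
  | cons c cs ih =>
    intro c0
    simp only [List.map_cons, List.foldl_cons]
    rw [pvCombineB_find? l hl c0 c, ih]
    congr 1
    funext p
    simp [Bool.or_assoc]

theorem find?_enumerate_snd (comps : List (List (String × String)))
    (c : List (String × String) → Bool) : ∀ s,
    ((PySem.List.enumerate comps s).find? (fun p => c p.2)).map (·.2) = comps.find? c := by
  induction comps with
  | nil => intro s; simp [PySem.List.enumerate_nil]
  | cons comp rest ih =>
    intro s
    rw [PySem.List.enumerate_cons]
    by_cases h : c comp <;> simp [List.find?, h, ih]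

-- the disjunction of B's candidate predicates is exactly A's match predicate
theorem pvPred_eq (f : String) (p : Int × List (String × String)) :
    (pvCondE f p || ((pvSlashPrefixes [] f.toList).map pvCondP).any (fun c => c p)) = pvMatch f p.2 := by
  simp only [pvCondE, pvMatch, List.any_map, Function.comp]
  by_cases hr : (PySem.Dict.mk p.2).getD "root_path" "" = ""
  · simp only [hr, if_pos rfl]
    simp [pvCondP, hr]
  · have hmem : pvRstripSlash ((PySem.Dict.mk p.2).getD "root_path" "").toList ∈ pvSlashPrefixes [] f.toList
        ↔ PySem.Chars.startswith f.toList (pvRstripSlash ((PySem.Dict.mk p.2).getD "root_path" "").toList ++ ['/']) = true := by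
      rw [mem_pvSlashPrefixes _ _ []]
      simp only [PySem.Chars.startswith, List.isPrefixOf_iff_prefix]
      constructor
      · rintro ⟨u, v, hcs, hq⟩
        exact ⟨v, by simp [hcs, hq]⟩
      · rintro ⟨t, ht⟩
        exact ⟨pvRstripSlash ((PySem.Dict.mk p.2).getD "root_path" "").toList, t, by simp [← ht], by simp⟩
    by_cases hs : PySem.Chars.startswith f.toList (pvRstripSlash ((PySem.Dict.mk p.2).getD "root_path" "").toList ++ ['/']) = true
    · have hone : (pvSlashPrefixes [] f.toList).any (fun q => pvCondP q p) = true :=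
        List.any_eq_true.2 ⟨_, hmem.2 hs, by simp [pvCondP, hr]⟩
      simp [hone, hs, hr]
      exact Or.inr (List.any_eq_true.1 hone)
    · have hnone : ((pvSlashPrefixes [] f.toList).any ((fun c => c p) ∘ pvCondP)) = false := by
        simp only [List.any_eq_false, Function.comp]
        intro q hq
        simp only [pvCondP]
        by_cases he : pvRstripSlash ((PySem.Dict.mk p.2).getD "root_path" "").toList = q
        · exact absurd (hmem.1 (he ▸ hq)) hs
        · simp [he]
      have hroot : (!((PySem.Dict.mk p.2).getD "root_path" "" == "")) = true := by simp [hr]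
      by_cases hf : f = (PySem.Dict.mk p.2).getD "root_path" ""
      · simp [hf, hnone, hs, hroot]; exact hr
      · have hf' : ¬ (PySem.Dict.mk p.2).getD "root_path" "" = f := fun h => hf h.symm
        simp [hf, hf', hnone, hs, hroot]

theorem pvBestB_eq (f : String) (comps : List (List (String × String))) :
    (pvBestB f ((PySem.List.enumerate comps 0).foldl pvStepB (PySem.Dict.empty, PySem.Dict.empty)).1
      ((PySem.List.enumerate comps 0).foldl pvStepB (PySem.Dict.empty, PySem.Dict.empty)).2).map (·.2)
      = pvFirstMatchA f comps := by
  unfold pvBestB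
  rw [pvWalkB_eq_foldl]
  rw [pvBuild_fst]
  simp only [pvBuild_snd, PySem.Dict.get?_empty, Option.none_or]
  have : (pvSlashPrefixes [] f.toList).map
      (fun q => (PySem.List.enumerate comps 0).find? (pvCondP q))
      = ((pvSlashPrefixes [] f.toList).map pvCondP).map ((PySem.List.enumerate comps 0).find? ·) := by
    rw [List.map_map]; rfl
  rw [this, pvFoldCombine_find? _ (PySem.List.pairwise_lt_enumerate comps 0)]
  have hpred : (fun p => pvCondE f p || ((pvSlashPrefixes [] f.toList).map pvCondP).any (fun c => c p))
      = (fun (p : Int × List (String × String)) => pvMatch f p.2) := by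
    funext p; exact pvPred_eq f p
  rw [hpred, find?_enumerate_snd, pvFirstMatchA_eq_find?]

theorem map_files_to_components_spec : Claim_equal_map_files_to_components := by
  intro changed_files components _ _
  unfold Spec_map_files_to_components map_files_to_components map_files_to_components_alt pvLoopB
  have hstep : (fun (acc : PySem.Set String × List String) filepath =>
      match pvFirstMatchA filepath components with
      | some comp => (PySem.Set.add acc.1 ((PySem.Dict.mk comp).getD "name" ""), acc.2)
      | none => (acc.1, acc.2 ++ [filepath]))
      = (fun (acc : PySem.Set String × List String) f =>
      match pvBestB f ((PySem.List.enumerate components 0).foldl pvStepB (PySem.Dict.empty, PySem.Dict.empty)).1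
          ((PySem.List.enumerate components 0).foldl pvStepB (PySem.Dict.empty, PySem.Dict.empty)).2 with
      | some p => (PySem.Set.add acc.1 ((PySem.Dict.mk p.2).getD "name" ""), acc.2)
      | none => (acc.1, acc.2 ++ [f])) := by
    funext acc f
    have key := pvBestB_eq f components
    cases hb : pvBestB f ((PySem.List.enumerate components 0).foldl pvStepB (PySem.Dict.empty, PySem.Dict.empty)).1
        ((PySem.List.enumerate components 0).foldl pvStepB (PySem.Dict.empty, PySem.Dict.empty)).2 with
    | none => rw [hb] at key; simp only [Option.map_none] at key; rw [← key]
    | some p => rw [hb] at key; simp only [Option.map_some] at key; rw [← key]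
  rw [hstep]
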